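-- pv_equiv track=rewrite | github.com/Kukalooka/pytong | main.py | unhash
-- ===== SOURCE A (Python) =====
-- def unhash(word):
--     wors = list(word)
--     spol = ["b", "d", "g", "w", "z", "ź", "ż", "l", "ł", "r", "m", "n", "j", "p", "t",
--             "k", "f", "s", "ś", "c", "ć"]
--
--     remember = ""
--     firstIndex = 0
--
--     for index, x in reversed(list(enumerate(wors))):
--         for y in spol:
--             if x == y:
--                 wors[index] = remember
--                 if remember == "":
--                     firstIndex = index
--                 remember = y
--     wors[firstIndex] = remember
--     return ''.join(wors)
-- ===== SOURCE B (Python) =====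
-- def unhash(word):
--     cons = set("bdgwz\u017a\u017cl\u0142rmnjptkfs\u015bc\u0107")
--     pairs = [(i, ch) for i, ch in enumerate(word) if ch in cons]
--     if not pairs:
--         return word
--     idx = [i for i, _ in pairs]
--     vals = [ch for _, ch in pairs]
--     rot = vals[1:] + vals[:1]
--     chars = list(word)
--     for j, c in zip(idx, rot):
--         chars[j] = c
--     return ''.join(chars)
-- ===== Notes on version B (the rewrite author's own statement) =====
-- stated objective: faster
-- what changed: Replaces A's right-to-left carry loop, which scans the 21-entry consonant table for every character, by one forward pass that collects the consonant positions and values, rotates the value list left by one and writes it back; on no-consonant words B returns the word unchanged instead of A's dropped first character.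
-- intended difference: On non-empty words containing no consonant of the table, A returns the word with its first character dropped (its final write blanks the stale first index 0), while B returns the word unchanged, which is the intended value since there is nothing to rotate. — e.g. on unhash("aa"): A returns "a", B returns "aa"
import Mathlib
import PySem

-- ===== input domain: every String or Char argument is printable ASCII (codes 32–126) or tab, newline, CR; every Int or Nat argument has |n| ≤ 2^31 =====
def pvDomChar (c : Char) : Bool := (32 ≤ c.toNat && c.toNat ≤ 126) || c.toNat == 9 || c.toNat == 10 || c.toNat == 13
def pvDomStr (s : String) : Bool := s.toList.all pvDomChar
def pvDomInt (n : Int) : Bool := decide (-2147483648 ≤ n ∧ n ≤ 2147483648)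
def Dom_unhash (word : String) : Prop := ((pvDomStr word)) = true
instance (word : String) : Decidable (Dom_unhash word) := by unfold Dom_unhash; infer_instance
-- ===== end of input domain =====

-- B rotates the consonants in one forward pass (collect positions/values, rotate, write back)
-- instead of A's right-to-left carry loop with an inner scan of the consonant table; on words
-- with no consonant B returns the word unchanged where A drops the first character (see D_ below).
-- ===== PORT A =====
def spolA : List (List Char) :=
  [['b'], ['d'], ['g'], ['w'], ['z'], ['ź'], ['ż'], ['l'], ['ł'], ['r'], ['m'],
   ['n'], ['j'], ['p'], ['t'], ['k'], ['f'], ['s'], ['ś'], ['c'], ['ć']]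

-- the inner 'for y in spol' loop (each Python 1-char string is a List Char)
def unhashInner (index : Int) (x : List Char)
    (st : List (List Char) × List Char × Int) : List (List Char) × List Char × Int :=
  spolA.foldl
    (fun st y =>
      if x == y then
        (st.1.set index.toNat st.2.1, y, if st.2.1 == [] then index else st.2.2)
      else st) st

-- 'for index, x in reversed(list(enumerate(wors)))' over the snapshot pair list
def unhashLoop : List (Int × List Char) → List (List Char) × List Char × Int →
    List (List Char) × List Char × Int
  | [], st => st
  | (index, x) :: rest, st => unhashLoop rest (unhashInner index x st)

def unhash (word : String) : String :=
  let wors : List (List Char) := word.toList.map (fun c => [c])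
  let st := unhashLoop ((PySem.List.enumerate wors).reverse) (wors, ([] : List Char), (0 : Int))
  String.ofList (PySem.Chars.join [] (st.1.set st.2.2.toNat st.2.1))

-- ===== PORT B =====
def consB : List Char := PySem.Set.ofList "bdgwzźżlłrmnjptkfsścć".toList

def unhash_alt (word : String) : String :=
  let s := word.toList
  let cp := (PySem.List.enumerate s).filter (fun p => PySem.Set.contains consB p.2)
  if cp.isEmpty then word
  else
    let idx := cp.map Prod.fst
    let vals := cp.map Prod.snd
    let rot := vals.drop 1 ++ vals.take 1
    String.ofList ((idx.zip rot).foldl (fun cs p => cs.set p.1.toNat p.2) s)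

-- ===== PRECONDITION & SPEC =====
-- Pre_ excludes only the empty word, on which A's final write raises IndexError.
def Pre_unhash (word : String) : Prop := word ≠ ""
instance (word : String) : Decidable (Pre_unhash word) := by unfold Pre_unhash; infer_instance
def pvWitness_unhash : String := "ab"

-- On non-empty words containing no consonant of the table, A returns the word with its first
-- character dropped (its final write blanks index 0, the stale initial firstIndex), while B
-- returns the word unchanged, which is the intended value: there is nothing to rotate.
def D_unhash (word : String) : Prop :=
  word ≠ "" ∧ word.toList.all (fun c => !("bdgwzźżlłrmnjptkfsścć".toList.contains c)) = true
instance (word : String) : Decidable (D_unhash word) := by unfold D_unhash; infer_instance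

def Spec_unhash (word : String) (out : String) : Prop := ¬ D_unhash word → out = unhash_alt word
instance (word : String) (out : String) : Decidable (Spec_unhash word out) := by
  unfold Spec_unhash; infer_instance

def pvDiffWitness_unhash : String := "aa"
def pvDiffWitnessOut_unhash : String × String := ("a", "aa")

-- ===== CLAIM (what is proved, stated in full; the proofs are below) =====
def Claim_unchanged_unhash : Prop :=
  ∀ (word : String), Dom_unhash word → Pre_unhash word → Spec_unhash word (unhash word)
def Claim_changed_unhash : Prop :=
  Dom_unhash (pvDiffWitness_unhash) ∧ Pre_unhash (pvDiffWitness_unhash) ∧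
  D_unhash (pvDiffWitness_unhash) ∧ unhash (pvDiffWitness_unhash) = pvDiffWitnessOut_unhash.1 ∧
  unhash_alt (pvDiffWitness_unhash) = pvDiffWitnessOut_unhash.2 ∧
  pvDiffWitnessOut_unhash.1 ≠ pvDiffWitnessOut_unhash.2
def Claim_exact_unhash : Prop :=
  ∀ (word : String), Dom_unhash word → Pre_unhash word → D_unhash word →
    unhash word ≠ unhash_alt word
-- ===== LEMMAS AND PROOFS =====

-- the inner 'for y in spol' fold does nothing when x is not in the table
lemma foldA_not_mem (x : List Char) (i : Int) :
    ∀ (l : List (List Char)) (st : List (List Char) × List Char × Int), x ∉ l →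
      l.foldl (fun st y =>
        if x == y then (st.1.set i.toNat st.2.1, y, if st.2.1 == [] then i else st.2.2)
        else st) st = st := by
  intro l
  induction l with
  | nil => intro st _; rfl
  | cons y t ih =>
    intro st h
    rw [List.mem_cons, not_or] at h
    rw [List.foldl_cons]
    have hxy : (x == y) = false := beq_eq_false_iff_ne.mpr h.1
    rw [hxy]
    exact ih st h.2

-- and performs exactly one update when x occurs in a duplicate-free table
lemma foldA_mem (x : List Char) (i : Int) :
    ∀ (l : List (List Char)), l.Nodup → x ∈ l →
      ∀ (w : List (List Char)) (r : List Char) (f : Int),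
      l.foldl (fun st y =>
        if x == y then (st.1.set i.toNat st.2.1, y, if st.2.1 == [] then i else st.2.2)
        else st) (w, r, f) = (w.set i.toNat r, x, if r == [] then i else f) := by
  intro l
  induction l with
  | nil => intro _ h; exact absurd h (List.not_mem_nil)
  | cons y t ih =>
    intro hnd hmem w r f
    rw [List.foldl_cons]
    by_cases hxy : x = y
    · subst hxy
      rw [beq_self_eq_true]
      simp only [if_true]
      exact foldA_not_mem x i t _ ((List.nodup_cons.mp hnd).1)
    · rw [beq_eq_false_iff_ne.mpr hxy]
      simp only [Bool.false_eq_true, if_false]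
      exact ih (List.nodup_cons.mp hnd).2 ((List.mem_cons.mp hmem).resolve_left hxy) w r f

lemma consB_eq : consB = "bdgwzźżlłrmnjptkfsścć".toList := by decide

lemma spolA_eq_map : spolA = consB.map (fun c => [c]) := by decide

lemma mem_spolA (c : Char) : [c] ∈ spolA ↔ PySem.Set.contains consB c = true := by
  rw [spolA_eq_map, PySem.Set.contains_iff, List.mem_map]
  constructor
  · rintro ⟨a, ha, hac⟩
    obtain rfl : a = c := by simpa using hac
    exact ha
  · intro hc; exact ⟨c, hc, rfl⟩

lemma inner_cons (i : Int) (c : Char) (hc : PySem.Set.contains consB c = true)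
    (w : List (List Char)) (r : List Char) (f : Int) :
    unhashInner i [c] (w, r, f) = (w.set i.toNat r, [c], if r == [] then i else f) := by
  unfold unhashInner
  exact foldA_mem [c] i spolA (by decide) ((mem_spolA c).mpr hc) w r f

lemma inner_skip (i : Int) (c : Char) (hc : PySem.Set.contains consB c = false)
    (st : List (List Char) × List Char × Int) : unhashInner i [c] st = st := by
  unfold unhashInner
  exact foldA_not_mem [c] i spolA st (fun hm => by
    rw [mem_spolA c] at hm; rw [hc] at hm; exact Bool.false_ne_true hm)

-- the write list A performs, as a function of the consonant pairs and the incoming 'remember'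
def rotWrites : List (Int × Char) → List Char → List (Int × List Char)
  | [], _ => []
  | (i, _) :: rest, r =>
    (i, match rest with | [] => r | (_, u) :: _ => [u]) :: rotWrites rest r

lemma rotWrites_cons_cons (p q : Int × Char) (t : List (Int × Char)) (r : List Char) :
    rotWrites (p :: q :: t) r = (p.1, [q.2]) :: rotWrites (q :: t) r := by
  obtain ⟨i, c⟩ := p; obtain ⟨j, u⟩ := q; rfl

lemma rotWrites_concat : ∀ (cp : List (Int × Char)) (i : Int) (c : Char) (r : List Char),
    rotWrites (cp ++ [(i, c)]) r = rotWrites cp [c] ++ [(i, r)] := by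
  intro cp
  induction cp with
  | nil => intro i c r; rfl
  | cons p t ih =>
    intro i c r
    obtain ⟨j, u⟩ := p
    cases t with
    | nil => rfl
    | cons q t2 =>
      obtain ⟨k, v⟩ := q
      have h := ih i c r
      simp only [rotWrites, List.cons_append] at h ⊢
      rw [h]

lemma rotWrites_zip : ∀ (cp : List (Int × Char)) (r : List Char),
    rotWrites cp r =
      (cp.map Prod.fst).zip (((cp.map Prod.snd).drop 1).map (fun c => [c]) ++ [r]) := by
  intro cp
  induction cp with
  | nil => intro r; rfl
  | cons p t ih =>
    intro r
    obtain ⟨j, u⟩ := p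
    cases t with
    | nil => rfl
    | cons q t2 =>
      have h := ih r
      simp only [rotWrites, List.map_cons, List.drop_succ_cons, List.drop_zero] at h ⊢
      rw [h]
      simp only [List.cons_append, List.zip_cons_cons]

-- characterisation of A's whole scan over an arbitrary snapshot pair list
lemma loop_spec : ∀ (ps : List (Int × Char)) (w : List (List Char)) (r : List Char) (f : Int),
    unhashLoop ((ps.map (fun p => (p.1, ([p.2] : List Char)))).reverse) (w, r, f) =
      ((rotWrites (ps.filter (fun p => PySem.Set.contains consB p.2)) r).foldr
          (fun p w => w.set p.1.toNat p.2) w,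
       (ps.filter (fun p => PySem.Set.contains consB p.2)).head?.elim r (fun p => [p.2]),
       if r == [] then
         (ps.filter (fun p => PySem.Set.contains consB p.2)).getLast?.elim f Prod.fst
       else f) := by
  intro ps
  induction ps using List.reverseRecOn with
  | nil => intro w r f; simp [unhashLoop, rotWrites]
  | append_singleton qs q ih =>
    intro w r f
    obtain ⟨i, c⟩ := q
    rw [List.map_append, List.reverse_append]
    simp only [List.map_cons, List.map_nil, List.reverse_cons, List.reverse_nil,
      List.nil_append, List.singleton_append]
    rw [show ∀ st, unhashLoop (((i : Int), ([c] : List Char)) ::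
        (qs.map (fun p => (p.1, ([p.2] : List Char)))).reverse) st =
        unhashLoop ((qs.map (fun p => (p.1, ([p.2] : List Char)))).reverse)
          (unhashInner i [c] st) from fun _ => rfl]
    rw [List.filter_append]
    by_cases hc : PySem.Set.contains consB c = true
    · rw [inner_cons i c hc w r f, ih]
      have hfil : List.filter (fun p => PySem.Set.contains consB p.2) [((i : Int), c)]
          = [(i, c)] := by simp [List.filter_cons]; exact (PySem.Set.contains_iff consB c).mp hc
      rw [hfil, rotWrites_concat, List.foldr_append]
      refine congrArg₂ _ rfl (congrArg₂ _ ?_ ?_)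
      · cases hq : List.filter (fun p => PySem.Set.contains consB p.2) qs with
        | nil => rfl
        | cons p0 tl => rfl
      · rw [show (([c] : List Char) == []) = false from rfl]
        simp only [Bool.false_eq_true, if_false]
        cases hr : (r == [])
        · simp
        · simp
    · have hc' : PySem.Set.contains consB c = false := by
        cases h : PySem.Set.contains consB c
        · rfl
        · exact absurd h hc
      rw [inner_skip i c hc', ih]
      have hfil : List.filter (fun p => PySem.Set.contains consB p.2) [((i : Int), c)]
          = [] := by
        simp [List.filter_cons]
        intro hm
        rw [(PySem.Set.contains_iff consB c).mpr hm] at hc'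
        exact Bool.true_eq_false.mp hc'
      rw [hfil, List.append_nil]

lemma set_foldr_comm {α : Type} (j : Nat) (a : α) :
    ∀ (W : List (Int × α)) (w : List α), (∀ p ∈ W, p.1.toNat ≠ j) →
      ((W.foldr (fun p cs => cs.set p.1.toNat p.2) w).set j a) =
        W.foldr (fun p cs => cs.set p.1.toNat p.2) (w.set j a) := by
  intro W
  induction W with
  | nil => intro w _; rfl
  | cons p t ih =>
    intro w h
    simp only [List.foldr_cons]
    rw [List.set_comm _ _ (h p List.mem_cons_self)]
    rw [ih w (fun q hq => h q (List.mem_cons_of_mem _ hq))]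

lemma foldl_set_eq_foldr {α : Type} :
    ∀ (W : List (Int × α)), W.Pairwise (fun p q => p.1.toNat ≠ q.1.toNat) → ∀ (w : List α),
      W.foldl (fun cs p => cs.set p.1.toNat p.2) w =
        W.foldr (fun p cs => cs.set p.1.toNat p.2) w := by
  intro W
  induction W with
  | nil => intro _ _; rfl
  | cons p t ih =>
    intro hpw w
    rw [List.foldl_cons, ih (List.pairwise_cons.mp hpw).2, List.foldr_cons,
      ← set_foldr_comm p.1.toNat p.2 t w
        (fun q hq => Ne.symm ((List.pairwise_cons.mp hpw).1 q hq))]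

-- A's trailing 'wors[firstIndex] = remember' turns the writes for 'r' into the writes for 'a'
lemma fix_last : ∀ (cp : List (Int × Char)), cp.Pairwise (fun p q => p.1 < q.1) →
    (∀ p ∈ cp, 0 ≤ p.1) → ∀ (hne : cp ≠ []) (w : List (List Char)) (r a : List Char),
    ((rotWrites cp r).foldr (fun p w => w.set p.1.toNat p.2) w).set ((cp.getLast hne).1.toNat) a
      = (rotWrites cp a).foldr (fun p w => w.set p.1.toNat p.2) w := by
  intro cp
  induction cp with
  | nil => intro _ _ hne; exact absurd rfl hne
  | cons p t ih =>
    intro hpw hnn hne w r a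
    cases t with
    | nil =>
      simp only [rotWrites, List.foldr_cons, List.foldr_nil, List.getLast_singleton]
      exact List.set_set r
    | cons q t2 =>
      have hlast : (p :: q :: t2).getLast hne = (q :: t2).getLast (List.cons_ne_nil q t2) :=
        List.getLast_cons _
      have hmem : (q :: t2).getLast (List.cons_ne_nil q t2) ∈ q :: t2 := List.getLast_mem _
      have hlt : p.1 < ((q :: t2).getLast (List.cons_ne_nil q t2)).1 :=
        (List.pairwise_cons.mp hpw).1 _ hmem
      have hp0 : 0 ≤ p.1 := hnn p List.mem_cons_self
      have hne' : p.1.toNat ≠ ((q :: t2).getLast (List.cons_ne_nil q t2)).1.toNat := by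
        omega
      rw [rotWrites_cons_cons, rotWrites_cons_cons, List.foldr_cons, List.foldr_cons, hlast,
        List.set_comm _ _ hne',
        ih (List.pairwise_cons.mp hpw).2
          (fun x hx => hnn x (List.mem_cons_of_mem _ hx)) (List.cons_ne_nil q t2) w r a]

lemma foldl_set_map : ∀ (W : List (Int × Char)) (l : List Char),
    ((W.foldl (fun cs p => cs.set p.1.toNat p.2) l).map (fun c => ([c] : List Char)))
      = (W.map (fun p => (p.1, ([p.2] : List Char)))).foldl
          (fun cs p => cs.set p.1.toNat p.2) (l.map (fun c => [c])) := by
  intro W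
  induction W with
  | nil => intro l; rfl
  | cons p t ih =>
    intro l
    simp only [List.map_cons, List.foldl_cons]
    rw [← List.map_set, ih]

lemma enumerate_map_sing : ∀ (l : List Char) (s : Int),
    PySem.List.enumerate (l.map (fun c => ([c] : List Char))) s =
      (PySem.List.enumerate l s).map (fun p => (p.1, ([p.2] : List Char))) := by
  intro l
  induction l with
  | nil => intro s; simp [PySem.List.enumerate_nil]
  | cons c t ih =>
    intro s
    simp only [List.map_cons, PySem.List.enumerate_cons]
    rw [ih]

lemma cp_pairwise (l : List Char) :
    ((PySem.List.enumerate l).filter (fun p => PySem.Set.contains consB p.2)).Pairwise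
      (fun p q => p.1 < q.1) := by
  exact (PySem.List.pairwise_lt_enumerate l 0).filter _

lemma cp_nonneg (l : List Char) :
    ∀ p ∈ (PySem.List.enumerate l).filter (fun p => PySem.Set.contains consB p.2), 0 ≤ p.1 := by
  intro p hp
  have hm := (List.mem_filter.mp hp).1
  rw [PySem.List.mem_enumerate_iff] at hm
  obtain ⟨k, hk, rfl⟩ := hm
  simp

lemma main_eq (word : String)
    (h : ∃ c ∈ word.toList, PySem.Set.contains consB c = true) :
    unhash word = unhash_alt word := by
  have hcpne : (PySem.List.enumerate word.toList).filter
      (fun p => PySem.Set.contains consB p.2) ≠ [] := by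
    obtain ⟨c0, hc0l, hc0⟩ := h
    obtain ⟨k, hk, hEq⟩ := List.mem_iff_getElem.mp hc0l
    refine List.ne_nil_of_mem (a := ((k : Int), word.toList[k])) ?_
    refine List.mem_filter.mpr ⟨?_, ?_⟩
    · rw [PySem.List.mem_enumerate_iff]
      exact ⟨k, hk, by simp⟩
    · simpa [hEq] using hc0
  obtain ⟨p0, tl, hcons⟩ := List.exists_cons_of_ne_nil hcpne
  have hpw := cp_pairwise word.toList
  have hnn := cp_nonneg word.toList
  rw [hcons] at hpw hnn
  simp only [unhash, unhash_alt]
  rw [enumerate_map_sing, loop_spec, hcons]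
  simp only [List.head?_cons, Option.elim_some, List.isEmpty_cons, Bool.false_eq_true,
    if_false]
  have hgl : (p0 :: tl).getLast?.elim (0 : Int) Prod.fst
      = ((p0 :: tl).getLast (List.cons_ne_nil p0 tl)).1 := by
    rw [List.getLast?_eq_some_getLast (List.cons_ne_nil p0 tl)]; rfl
  have hif : (if (([] : List Char) == []) = true
        then (p0 :: tl).getLast?.elim (0 : Int) Prod.fst else 0)
      = (p0 :: tl).getLast?.elim (0 : Int) Prod.fst := if_pos rfl
  rw [hif, hgl,
    fix_last (p0 :: tl) hpw hnn (List.cons_ne_nil p0 tl) _ [] [p0.2], rotWrites_zip]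
  have hrot : ((List.map Prod.snd (p0 :: tl)).drop 1).map (fun c => ([c] : List Char)) ++ [[p0.2]]
      = ((List.map Prod.snd (p0 :: tl)).drop 1
          ++ (List.map Prod.snd (p0 :: tl)).take 1).map (fun c => [c]) := by
    simp
  rw [hrot, List.zip_map_right]
  have hpm : (Prod.map (@id Int) (fun c => ([c] : List Char)))
      = (fun p : Int × Char => (p.1, ([p.2] : List Char))) := by
    funext p; cases p; rfl
  rw [hpm]
  set W0 := (List.map Prod.fst (p0 :: tl)).zip
    ((List.map Prod.snd (p0 :: tl)).drop 1 ++ (List.map Prod.snd (p0 :: tl)).take 1) with hW0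
  have hPW : (W0.map (fun p => (p.1, ([p.2] : List Char)))).Pairwise
      (fun p q => p.1.toNat ≠ q.1.toNat) := by
    rw [List.pairwise_map]
    have hfst : W0.map Prod.fst = List.map Prod.fst (p0 :: tl) := by
      apply List.map_fst_zip
      simp
    have h1 : (W0.map Prod.fst).Pairwise (fun a b : Int => a.toNat ≠ b.toNat) := by
      rw [hfst, List.pairwise_map]
      refine List.Pairwise.imp_of_mem ?_ hpw
      intro a b ha hb hab
      have := hnn a ha
      omega
    rw [List.pairwise_map] at h1
    exact h1
  rw [← foldl_set_eq_foldr _ hPW, ← foldl_set_map, PySem.Chars.join_nil_singletons]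

-- ===== VERDICT (by name: the statement is the Claim_ definition above) =====
theorem unhash_spec : Claim_unchanged_unhash := by
  intro word _ hpre
  unfold Spec_unhash
  intro hnd
  apply main_eq
  unfold D_unhash at hnd
  have h2 : ¬ (word.toList.all
      (fun c => !("bdgwzźżlłrmnjptkfsścć".toList.contains c)) = true) := fun hh => hnd ⟨hpre, hh⟩
  rw [List.all_eq_true] at h2
  push Not at h2
  obtain ⟨c, hcl, hc⟩ := h2
  refine ⟨c, hcl, ?_⟩
  rw [PySem.Set.contains_eq_listContains, consB_eq]
  cases hcc : List.contains "bdgwzźżlłrmnjptkfsścć".toList c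
  · exact absurd (by rw [hcc]; rfl) hc
  · rfl

theorem unhash_changed : Claim_changed_unhash := by
  unfold Claim_changed_unhash; decide

theorem unhash_tight : Claim_exact_unhash := by
  intro word _ hpre hD
  obtain ⟨hne, hall⟩ := hD
  have hlt : word.toList ≠ [] := fun hh => hne (String.toList_eq_nil_iff.mp hh)
  obtain ⟨c, t, hct⟩ := List.exists_cons_of_ne_nil hlt
  have hcp : (PySem.List.enumerate word.toList).filter
      (fun p => PySem.Set.contains consB p.2) = [] := by
    rw [List.filter_eq_nil_iff]
    intro p hp
    rw [PySem.List.mem_enumerate_iff] at hp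
    obtain ⟨k, hk, rfl⟩ := hp
    have hmem : word.toList[k] ∈ word.toList := List.getElem_mem hk
    have hcc := List.all_eq_true.mp hall _ hmem
    rw [Bool.not_eq_eq_eq_not, Bool.not_true] at hcc
    rw [PySem.Set.contains_eq_listContains, consB_eq]
    intro hx
    rw [hx] at hcc
    exact Bool.true_eq_false.mp hcc
  simp only [unhash, unhash_alt]
  rw [enumerate_map_sing, loop_spec, hcp]
  simp only [rotWrites, List.foldr_nil, List.head?_nil, Option.elim_none, List.getLast?_nil,
    List.isEmpty_nil, if_true, ite_self, Int.toNat_zero]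
  rw [hct]
  simp only [List.map_cons, List.set_cons_zero]
  have hjoin : PySem.Chars.join [] (([] : List Char) :: t.map (fun c => [c])) = t := by
    cases t with
    | nil => rfl
    | cons d t2 =>
      rw [List.map_cons, PySem.Chars.join_cons_cons, List.nil_append, List.nil_append]
      exact PySem.Chars.join_nil_singletons (d :: t2)
  rw [hjoin]
  intro heq
  have := congrArg String.toList heq
  rw [String.toList_ofList, hct] at this
  exact List.cons_ne_self c t this.symm
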